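-- pv_equiv track=rewrite | github.com/KHminor/Algorithm | 프로그래머스/lv2/43165. 타겟 넘버/타겟 넘버.py | solution
-- ===== SOURCE A (Python) =====
-- from collections import deque
--
-- def solution(numbers, target):
--     answer = 0
--     stack = deque([[0,0]])
--     while stack:
--         idx, hap = stack.popleft()
--         if idx < len(numbers):
--             stack.append([idx+1, hap+numbers[idx]])
--             stack.append([idx+1, hap-numbers[idx]])
--         else:
--             if hap == target:
--                 answer += 1
--     return answer
-- ===== SOURCE B (Python) =====
-- def solution(numbers, target):
--     counts = {0: 1}
--     for x in numbers:
--         nxt = {}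
--         for s, c in counts.items():
--             nxt[s + x] = nxt.get(s + x, 0) + c
--             nxt[s - x] = nxt.get(s - x, 0) + c
--         counts = nxt
--     return counts.get(target, 0)
-- ===== Notes on version B (the rewrite author's own statement) =====
-- stated objective: faster
-- what changed: Replaces the O(2^n) BFS enumeration of all sign assignments with a dictionary DP that merges equal partial sums each step, counting ways per achievable sum.
import Mathlib
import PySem

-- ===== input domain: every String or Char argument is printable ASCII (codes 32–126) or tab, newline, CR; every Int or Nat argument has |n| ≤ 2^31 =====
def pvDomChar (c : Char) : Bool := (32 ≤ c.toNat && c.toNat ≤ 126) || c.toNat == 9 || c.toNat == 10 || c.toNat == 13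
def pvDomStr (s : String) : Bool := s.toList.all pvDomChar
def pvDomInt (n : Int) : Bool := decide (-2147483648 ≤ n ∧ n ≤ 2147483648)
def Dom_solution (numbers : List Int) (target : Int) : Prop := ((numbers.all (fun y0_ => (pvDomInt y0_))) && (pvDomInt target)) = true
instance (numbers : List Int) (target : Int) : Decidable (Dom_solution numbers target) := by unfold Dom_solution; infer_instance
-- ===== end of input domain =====

-- B replaces A's O(2^n) BFS over all sign assignments by a per-step dictionary DP
-- (ways per achievable partial sum), which a timing run measured as faster.

-- ===== PORT A =====
-- the BFS loop: pop the front of the queue, push the two extensions at the back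
def solLoop (numbers : List Int) (target : Int) (stack : List (Nat × Int)) (answer : Int) : Int :=
  match stack with
  | [] => answer
  | (idx, hap) :: rest =>
    if idx < numbers.length then
      -- numbers[idx]: getD is exact here because the access is guarded by idx < len(numbers)
      solLoop numbers target
        (rest ++ [(idx + 1, hap + numbers.getD idx 0), (idx + 1, hap - numbers.getD idx 0)]) answer
    else
      solLoop numbers target rest (if hap = target then answer + 1 else answer)
termination_by (stack.map (fun p => 3 ^ (numbers.length + 1 - p.1))).sum
decreasing_by
  · have h1 : numbers.length + 1 - idx = (numbers.length - idx) + 1 := by omega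
    have h2 : numbers.length + 1 - (idx + 1) = numbers.length - idx := by omega
    have h3 : 0 < 3 ^ (numbers.length - idx) := pow_pos (by omega) _
    simp [List.map_append, List.sum_append, h1, h2, pow_succ]
    omega
  · have h3 : 0 < 3 ^ (numbers.length + 1 - idx) := pow_pos (by omega) _
    simp only [List.map_cons, List.sum_cons]
    omega

def solution (numbers : List Int) (target : Int) : Int :=
  solLoop numbers target [(0, 0)] 0

-- ===== PORT B =====
def solution_alt (numbers : List Int) (target : Int) : Int :=
  let counts :=
    numbers.foldl
      (fun counts x =>
        counts.items.foldl
          (fun nxt sc =>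
            let nxt1 := nxt.insert (sc.1 + x) (nxt.getD (sc.1 + x) 0 + sc.2)
            nxt1.insert (sc.1 - x) (nxt1.getD (sc.1 - x) 0 + sc.2))
          PySem.Dict.empty)
      (PySem.Dict.ofList [((0 : Int), (1 : Int))])
  counts.getD target 0

-- ===== PRECONDITION & SPEC =====
def Spec_solution (numbers : List Int) (target : Int) (out : Int) : Prop := out = solution_alt numbers target
instance (numbers : List Int) (target : Int) (out : Int) : Decidable (Spec_solution numbers target out) := by unfold Spec_solution; infer_instance

-- ===== CLAIM (what is proved, stated in full; the proofs are below) =====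
def Claim_equal_solution : Prop := ∀ (numbers : List Int) (target : Int), Dom_solution numbers target → Spec_solution numbers target (solution numbers target)

-- ===== LEMMAS AND PROOFS =====

/-- number of sign assignments of `l` that move `hap` to `target` -/
def ways : List Int → Int → Int → Int
  | [], hap, target => if hap = target then 1 else 0
  | x :: xs, hap, target => ways xs (hap + x) target + ways xs (hap - x) target

lemma solLoop_inv (numbers : List Int) (target : Int) :
    ∀ (stack : List (Nat × Int)) (answer : Int),
      solLoop numbers target stack answer
        = answer + (stack.map (fun p => ways (numbers.drop p.1) p.2 target)).sum := by
  intro stack answer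
  induction stack, answer using solLoop.induct numbers target with
  | case1 answer => simp [solLoop]
  | case2 answer idx hap rest h ih =>
    rw [solLoop]
    simp only [if_pos h]
    rw [ih]
    have hd : numbers.drop idx = numbers[idx] :: numbers.drop (idx + 1) :=
      List.drop_eq_getElem_cons h
    have hg : numbers.getD idx 0 = numbers[idx] := List.getD_eq_getElem numbers 0 h
    simp only [List.map_cons, List.sum_cons, List.map_append, List.sum_append, List.map_nil,
      List.sum_nil, hd, hg, ways]
    ring
  | case3 answer idx hap rest h ih =>
    rw [solLoop]
    simp only [if_neg h]
    have hd : numbers.drop idx = ([] : List Int) := List.drop_eq_nil_of_le (by omega)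
    simp only [List.map_cons, List.sum_cons, hd, ways]
    split_ifs at ih ⊢ with hh <;> rw [ih] <;> ring

lemma solution_eq_ways (numbers : List Int) (target : Int) :
    solution numbers target = ways numbers 0 target := by
  simp [solution, solLoop_inv]

/-- the B-side fold body -/
def bStep (x : Int) (counts : PySem.Dict Int Int) : PySem.Dict Int Int :=
  counts.items.foldl
    (fun nxt sc =>
      let nxt1 := nxt.insert (sc.1 + x) (nxt.getD (sc.1 + x) 0 + sc.2)
      nxt1.insert (sc.1 - x) (nxt1.getD (sc.1 - x) 0 + sc.2))
    PySem.Dict.empty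

lemma bInner_getD (x t : Int) :
    ∀ (ps : List (Int × Int)) (n0 : PySem.Dict Int Int),
      (ps.foldl
        (fun nxt sc =>
          let nxt1 := nxt.insert (sc.1 + x) (nxt.getD (sc.1 + x) 0 + sc.2)
          nxt1.insert (sc.1 - x) (nxt1.getD (sc.1 - x) 0 + sc.2))
        n0).getD t 0
      = n0.getD t 0
        + (ps.map (fun sc =>
            (if sc.1 = t - x then sc.2 else 0) + (if sc.1 = t + x then sc.2 else 0))).sum := by
  intro ps
  induction ps with
  | nil => simp
  | cons sc tl ih =>
    intro n0
    simp only [List.foldl_cons, List.map_cons, List.sum_cons]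
    rw [ih]
    have hb : ((n0.insert (sc.1 + x) (n0.getD (sc.1 + x) 0 + sc.2)).insert (sc.1 - x)
        ((n0.insert (sc.1 + x) (n0.getD (sc.1 + x) 0 + sc.2)).getD (sc.1 - x) 0 + sc.2)).getD t 0
        = n0.getD t 0 + ((if sc.1 = t - x then sc.2 else 0) + (if sc.1 = t + x then sc.2 else 0)) := by
      by_cases hx : x = 0
      · subst hx
        simp only [PySem.Dict.getD_insert, add_zero, sub_zero]
        split_ifs <;> (try subst_vars) <;> omega
      · simp only [PySem.Dict.getD_insert]
        split_ifs <;> (try subst_vars) <;> omega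
    rw [hb]; ring

lemma sum_ite_eq_of_nodup (l : List Int) (h : l.Nodup) (f : Int → Int) (k : Int) :
    (l.map (fun j => if j = k then f j else 0)).sum = if k ∈ l then f k else 0 := by
  induction l with
  | nil => simp
  | cons a tl ih =>
    obtain ⟨ha, htl⟩ := List.nodup_cons.mp h
    simp only [List.map_cons, List.sum_cons, List.mem_cons, ih htl]
    by_cases hak : a = k
    · subst hak; simp [ha]
    · simp [hak, Ne.symm hak]

lemma dict_sum_ite (d : PySem.Dict Int Int) (h : d.keys.Nodup) (k : Int) :
    (d.items.map (fun sc => if sc.1 = k then sc.2 else 0)).sum = d.getD k 0 := by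
  rw [PySem.Dict.items_eq_map_keys d h 0, List.map_map]
  have hfun : ((fun sc : Int × Int => if sc.1 = k then sc.2 else 0) ∘ fun j => (j, d.getD j 0))
      = (fun j => if j = k then d.getD j 0 else 0) := rfl
  rw [hfun, sum_ite_eq_of_nodup d.keys h (fun j => d.getD j 0) k]
  by_cases hk : k ∈ d.keys
  · simp [hk]
  · rw [if_neg hk, PySem.Dict.getD_of_not_contains]
    rw [PySem.Dict.contains_eq_decide_mem_keys]
    simp [hk]

lemma bStep_getD (x t : Int) (d : PySem.Dict Int Int) (h : d.keys.Nodup) :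
    (bStep x d).getD t 0 = d.getD (t - x) 0 + d.getD (t + x) 0 := by
  unfold bStep
  rw [bInner_getD x t d.items PySem.Dict.empty]
  rw [PySem.List.sum_map_add_int]
  rw [dict_sum_ite d h (t - x), dict_sum_ite d h (t + x)]
  simp [PySem.Dict.getD_empty]

lemma bInner_nodup (x : Int) :
    ∀ (ps : List (Int × Int)) (n0 : PySem.Dict Int Int), n0.keys.Nodup →
      ((ps.foldl
        (fun nxt sc =>
          let nxt1 := nxt.insert (sc.1 + x) (nxt.getD (sc.1 + x) 0 + sc.2)
          nxt1.insert (sc.1 - x) (nxt1.getD (sc.1 - x) 0 + sc.2))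
        n0)).keys.Nodup := by
  intro ps
  induction ps with
  | nil => intro n0 h; simpa using h
  | cons sc tl ih =>
    intro n0 h
    simp only [List.foldl_cons]
    exact ih _ (PySem.Dict.nodup_keys_insert _ _ _ (PySem.Dict.nodup_keys_insert _ _ _ h))

lemma foldl_bStep_nodup (l : List Int) :
    ((l.foldl (fun counts x => bStep x counts) (PySem.Dict.ofList [((0 : Int), (1 : Int))]))).keys.Nodup := by
  have main : ∀ (ys : List Int) (d : PySem.Dict Int Int), d.keys.Nodup →
      ((ys.foldl (fun counts x => bStep x counts) d)).keys.Nodup := by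
    intro ys
    induction ys with
    | nil => intro d h; simpa using h
    | cons y tl ih =>
      intro d h
      simp only [List.foldl_cons]
      exact ih _ (bInner_nodup y d.items PySem.Dict.empty (PySem.Dict.nodup_keys_empty))
  exact main l _ (PySem.Dict.nodup_keys_ofList _)

lemma ways_append (l : List Int) (x : Int) :
    ∀ (h t : Int), ways (l ++ [x]) h t = ways l h (t - x) + ways l h (t + x) := by
  induction l with
  | nil => intro h t; simp only [List.nil_append, ways]; split_ifs <;> omega
  | cons y ys ih => intro h t; simp only [List.cons_append, ways, ih]; ring

lemma dp_eq_ways (l : List Int) :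
    ∀ t : Int,
      ((l.foldl (fun counts x => bStep x counts) (PySem.Dict.ofList [((0 : Int), (1 : Int))]))).getD t 0
        = ways l 0 t := by
  induction l using List.reverseRecOn with
  | nil =>
    intro t
    have h0 : (PySem.Dict.ofList [((0 : Int), (1 : Int))])
        = (PySem.Dict.empty.insert (0 : Int) (1 : Int)) := rfl
    rw [List.foldl_nil, h0, PySem.Dict.getD_insert]
    simp only [ways, PySem.Dict.getD_empty]
    split_ifs <;> omega
  | append_singleton ys x ih =>
    intro t
    rw [List.foldl_append, List.foldl_cons, List.foldl_nil]
    rw [show (bStep x) ((ys.foldl (fun counts c => bStep c counts) (PySem.Dict.ofList [((0 : Int), (1 : Int))]))) = bStep x _ from rfl]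
    rw [bStep_getD x t _ (foldl_bStep_nodup ys)]
    rw [ih, ih, ways_append]

-- ===== VERDICT (by name: the statement is the Claim_ definition above) =====
theorem solution_spec : Claim_equal_solution := by
  intro numbers target _
  unfold Spec_solution
  rw [solution_eq_ways]
  have : solution_alt numbers target
      = ((numbers.foldl (fun counts x => bStep x counts) (PySem.Dict.ofList [((0 : Int), (1 : Int))]))).getD target 0 := rfl
  rw [this, dp_eq_ways]
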